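-- pv_equiv track=rewrite | github.com/Yangshan-Xiang/MyTorch | mytorch/utils.py | to_tensor_idx
-- ===== SOURCE A (Python) =====
-- import math
--
-- def to_tensor_idx(storage_idx: int, shape: tuple) -> tuple:
--     """
--     Given the indices of an element within the storage of a tensor, the function returns the index of
--     the element within the tensor based on contiguous layout, regardless of the stride.
--
--     Args:
--         storage_idx (int): The index of the element within the storage of the tensor.
--         shape (tuple): The shape of the tensor.
--
--     Returns:
--         tuple: The index of the element within the tensor based on contiguous layout.
--
--     """
--     if storage_idx + 1 > math.prod(shape):
--         raise ValueError("Index out of bounds.")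
--
--     tensor_idx = [0] * len(shape)
--
--     for i in range(len(shape) - 1, -1, -1):
--         tensor_idx[i] = storage_idx % shape[i]
--         storage_idx //= shape[i]
--
--     return tuple(tensor_idx)
-- ===== SOURCE B (Python) =====
-- import math
--
-- def to_tensor_idx(storage_idx: int, shape: tuple) -> tuple:
--     if storage_idx + 1 > math.prod(shape):
--         raise ValueError("Index out of bounds.")
--     # pass 1: stride table (stride[i] = product of shape[i+1:]), built back-to-front
--     strides = []
--     p = 1
--     for s in reversed(shape):
--         strides.append(p)
--         p *= s
--     strides.reverse()
--     # pass 2: each coordinate independently from the original storage_idx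
--     return tuple((storage_idx // st) % s for st, s in zip(strides, shape))
-- ===== Notes on version B (the rewrite author's own statement) =====
-- stated objective: alternative
-- what changed: Instead of threading a mutating quotient through one descending loop, B first builds a stride table (suffix products of shape) in one pass and then computes every coordinate independently as (storage_idx // stride[i]) % shape[i].
-- outside the precondition, e.g. on to_tensor_idx(-19, (-2, -2, 2)): A returns (-1, 0, 1), B returns (0, 0, 1)
import Mathlib
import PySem

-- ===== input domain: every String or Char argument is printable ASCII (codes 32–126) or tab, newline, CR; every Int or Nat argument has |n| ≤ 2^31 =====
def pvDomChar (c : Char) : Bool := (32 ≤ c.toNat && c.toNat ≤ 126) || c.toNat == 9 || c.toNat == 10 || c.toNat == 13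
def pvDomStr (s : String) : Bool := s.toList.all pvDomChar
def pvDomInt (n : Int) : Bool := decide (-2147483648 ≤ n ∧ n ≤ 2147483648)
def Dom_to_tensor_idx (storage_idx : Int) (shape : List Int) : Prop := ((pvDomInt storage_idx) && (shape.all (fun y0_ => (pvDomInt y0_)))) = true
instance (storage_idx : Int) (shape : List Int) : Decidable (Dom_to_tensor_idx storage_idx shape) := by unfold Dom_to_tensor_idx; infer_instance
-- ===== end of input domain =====

-- B replaces A's single descending loop with a mutating quotient by two separate passes:
-- build a stride table (suffix products), then compute each coordinate independently.

-- ===== PORT A =====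
-- A's loop runs i from len(shape)-1 down to 0, setting tensor_idx[i] = storage_idx % shape[i]
-- and updating storage_idx //= shape[i]; ported as the structural recursion from the right over
-- the same state (the tensor_idx entries built right-to-left, and the running quotient).
def toTensorIdxLoop (storage_idx : Int) (shape : List Int) : List Int × Int :=
  match shape with
  | [] => ([], storage_idx)
  | s :: rest =>
    let st := toTensorIdxLoop storage_idx rest
    (PySem.Int.mod st.2 s :: st.1, PySem.Int.floordiv st.2 s)

def to_tensor_idx (storage_idx : Int) (shape : List Int) : List Int :=
  (toTensorIdxLoop storage_idx shape).1

-- ===== PORT B =====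
def to_tensor_idx_alt (storage_idx : Int) (shape : List Int) : List Int :=
  -- pass 1: stride table, built back-to-front (append then final reverse, as in Source B)
  let st := shape.reverse.foldl (fun (acc : List Int × Int) s => (acc.1 ++ [acc.2], acc.2 * s)) ([], 1)
  let strides := st.1.reverse
  -- pass 2: each coordinate independently from the original storage_idx
  (strides.zip shape).map (fun p => PySem.Int.mod (PySem.Int.floordiv storage_idx p.1) p.2)

-- ===== PRECONDITION & SPEC =====
-- Pre_ excludes (a) inputs where A raises (ValueError when storage_idx + 1 > prod(shape), and
-- ZeroDivisionError when 0 ∈ shape with storage_idx < 0), and (b) shapes with a negative entry,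
-- which lie outside the natural domain of a tensor shape and on which A's returned values are an
-- accident of its mutating-quotient loop.
def Pre_to_tensor_idx (storage_idx : Int) (shape : List Int) : Prop :=
  (∀ s ∈ shape, 0 < s) ∧ storage_idx + 1 ≤ shape.prod
instance (storage_idx : Int) (shape : List Int) : Decidable (Pre_to_tensor_idx storage_idx shape) := by unfold Pre_to_tensor_idx; infer_instance

def pvWitness_to_tensor_idx : Int × List Int := (3, [2, 3])

def Spec_to_tensor_idx (storage_idx : Int) (shape : List Int) (out : List Int) : Prop := out = to_tensor_idx_alt storage_idx shape
instance (storage_idx : Int) (shape : List Int) (out : List Int) : Decidable (Spec_to_tensor_idx storage_idx shape out) := by unfold Spec_to_tensor_idx; infer_instance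

-- ===== CLAIM (what is proved, stated in full; the proofs are below) =====
def Claim_equal_to_tensor_idx : Prop := ∀ (storage_idx : Int) (shape : List Int), Dom_to_tensor_idx storage_idx shape → Pre_to_tensor_idx storage_idx shape → Spec_to_tensor_idx storage_idx shape (to_tensor_idx storage_idx shape)

-- ===== LEMMAS AND PROOFS =====

-- Reference form both ports are reduced to: coordinate i is (x // prod shape[i+1:]) % shape[i].
def tiRef (x : Int) : List Int → List Int
  | [] => []
  | s :: rest => PySem.Int.mod (PySem.Int.floordiv x rest.prod) s :: tiRef x rest

lemma floordiv_floordiv_of_pos (x a b : Int) (ha : 0 < a) (hb : 0 < b) :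
    PySem.Int.floordiv (PySem.Int.floordiv x a) b = PySem.Int.floordiv x (a * b) := by
  rw [PySem.Int.floordiv_eq_ediv_of_pos ha, PySem.Int.floordiv_eq_ediv_of_pos hb,
    PySem.Int.floordiv_eq_ediv_of_pos (mul_pos ha hb)]
  exact Int.ediv_ediv_of_nonneg ha.le

-- A's running quotient after consuming the whole suffix `l` is a single floor division.
lemma toTensorIdxLoop_snd (x : Int) (l : List Int) (h : ∀ s ∈ l, 0 < s) :
    (toTensorIdxLoop x l).2 = PySem.Int.floordiv x l.prod := by
  induction l with
  | nil =>
    simp [toTensorIdxLoop, PySem.Int.floordiv]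
  | cons s rest ih =>
    have hs : 0 < s := h s (by simp)
    have hrest : ∀ t ∈ rest, 0 < t := fun t ht => h t (by simp [ht])
    have hp : 0 < rest.prod := List.prod_pos hrest
    simp only [toTensorIdxLoop, ih hrest, List.prod_cons]
    rw [floordiv_floordiv_of_pos x rest.prod s hp hs, mul_comm]

lemma toTensorIdx_eq_ref (x : Int) (l : List Int) (h : ∀ s ∈ l, 0 < s) :
    (toTensorIdxLoop x l).1 = tiRef x l := by
  induction l with
  | nil => rfl
  | cons s rest ih =>
    have hrest : ∀ t ∈ rest, 0 < t := fun t ht => h t (by simp [ht])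
    simp only [toTensorIdxLoop, tiRef, ih hrest, toTensorIdxLoop_snd x rest hrest]

-- B's stride fold: the running product is the list product …
lemma strideFold_snd (l : List Int) (acc : List Int) (p : Int) :
    (l.foldl (fun (acc : List Int × Int) s => (acc.1 ++ [acc.2], acc.2 * s)) (acc, p)).2
      = p * l.prod := by
  induction l generalizing acc p with
  | nil => simp
  | cons s rest ih => simp [List.foldl_cons, ih, mul_assoc]

-- … and the reversed first component peels off as `prod rest ::` on a cons shape.
lemma strides_cons (s : Int) (rest : List Int) :
    (((s :: rest).reverse.foldl (fun (acc : List Int × Int) t => (acc.1 ++ [acc.2], acc.2 * t)) ([], 1)).1).reverse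
      = rest.prod ::
        ((rest.reverse.foldl (fun (acc : List Int × Int) t => (acc.1 ++ [acc.2], acc.2 * t)) ([], 1)).1).reverse := by
  have h2 := strideFold_snd rest.reverse ([] : List Int) 1
  rw [List.reverse_cons, List.foldl_append, List.foldl_cons, List.foldl_nil, List.reverse_append,
    List.reverse_cons, List.reverse_nil, List.nil_append, List.singleton_append, h2, one_mul,
    List.prod_reverse]

lemma toTensorIdxAlt_eq_ref (x : Int) (l : List Int) :
    to_tensor_idx_alt x l = tiRef x l := by
  induction l with
  | nil => rfl
  | cons s rest ih =>
    simp only [to_tensor_idx_alt] at ih ⊢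
    rw [strides_cons s rest]
    simp only [List.zip_cons_cons, List.map_cons, tiRef, ih]

-- ===== VERDICT (by name: the statement is the Claim_ definition above) =====
theorem to_tensor_idx_spec : Claim_equal_to_tensor_idx := by
  intro x shape _ hpre
  unfold Spec_to_tensor_idx
  rw [to_tensor_idx, toTensorIdx_eq_ref x shape hpre.1, toTensorIdxAlt_eq_ref x shape]
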